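-- pv_equiv track=rewrite | github.com/Sebastian-NM/Bingo-A-S | logica.py | acomadarNumerosImportantes
-- ===== SOURCE A (Python) =====
-- def acomadarNumerosImportantes(pListaA,pListaB):
--     #indiceA (int)
--     indiceA =0
--     #indiceB (int)
--     indiceB =0
--     #listaNueva (list)
--     listaNueva=[]
--
--     while(indiceA<len(pListaA)):
--         while(indiceB<len(pListaB)):
--             if(pListaA[indiceA][0]==pListaB[indiceB][0]):
--                 listaNueva.append(pListaB[indiceB][1])
--             #Fin del if
--             indiceB = indiceB +1
--         #Fin del while
--         indiceB = 0
--         indiceA = indiceA + 1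
--     #Fin del while
--     return listaNueva
-- ===== SOURCE B (Python) =====
-- def acomadarNumerosImportantes(pListaA, pListaB):
--     # Group the rows of pListaB by their key once, then one pass over pListaA.
--     if not pListaA or not pListaB:
--         return []
--     porClave = {}
--     for fila in pListaB:
--         porClave.setdefault(fila[0], []).append(fila)
--     listaNueva = []
--     for fila in pListaA:
--         for f in porClave.get(fila[0], []):
--             listaNueva.append(f[1])
--     return listaNueva
-- ===== Notes on version B (the rewrite author's own statement) =====
-- stated objective: faster
-- what changed: B replaces A's nested rescan of pListaB per pListaA row by a dict grouping the pListaB rows by key built once, then a single pass over pListaA extending the result from the dict.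
import Mathlib
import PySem

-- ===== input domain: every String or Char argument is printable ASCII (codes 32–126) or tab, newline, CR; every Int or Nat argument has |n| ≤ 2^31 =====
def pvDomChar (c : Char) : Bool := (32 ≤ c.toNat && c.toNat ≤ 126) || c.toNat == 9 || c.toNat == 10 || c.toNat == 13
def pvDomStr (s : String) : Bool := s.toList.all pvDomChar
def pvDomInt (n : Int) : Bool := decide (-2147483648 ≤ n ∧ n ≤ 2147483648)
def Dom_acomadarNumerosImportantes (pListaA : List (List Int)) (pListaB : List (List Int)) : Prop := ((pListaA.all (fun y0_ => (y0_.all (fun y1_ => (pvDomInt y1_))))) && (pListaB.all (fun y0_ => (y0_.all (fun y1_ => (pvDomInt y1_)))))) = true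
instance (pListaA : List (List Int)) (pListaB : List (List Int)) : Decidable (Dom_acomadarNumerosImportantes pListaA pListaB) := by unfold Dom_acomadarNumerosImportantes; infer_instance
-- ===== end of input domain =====

-- B groups the rows of pListaB by key in a dict built once, then makes one pass
-- over pListaA (asymptotically faster than A's nested rescan of pListaB).


-- shared helpers: row[0] and row[1] (exact under Pre_, which guarantees the accesses are in range)
def pvKey (r : List Int) : Int := (PySem.List.pyGet? r 0).getD 0
def pvVal (r : List Int) : Int := (PySem.List.pyGet? r 1).getD 0

-- ===== PORT A =====
-- nested while loops over indices = nested foldl over the lists, same appends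
def acomadarNumerosImportantes (pListaA : List (List Int)) (pListaB : List (List Int)) : List Int :=
  pListaA.foldl (fun listaNueva ra =>
    pListaB.foldl (fun acc rb =>
      if pvKey ra = pvKey rb then acc ++ [pvVal rb] else acc) listaNueva) []

-- ===== PORT B =====
-- porClave.setdefault(fila[0], []).append(fila)
def pvGroupB (pListaB : List (List Int)) : PySem.Dict Int (List (List Int)) :=
  pListaB.foldl (fun d rb => d.insert (pvKey rb) (d.getD (pvKey rb) [] ++ [rb])) PySem.Dict.empty

def acomadarNumerosImportantes_alt (pListaA : List (List Int)) (pListaB : List (List Int)) : List Int :=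
  if pListaA = [] ∨ pListaB = [] then []
  else
    let porClave := pvGroupB pListaB
    pListaA.foldl (fun listaNueva ra =>
      (porClave.getD (pvKey ra) []).foldl (fun acc f => acc ++ [pvVal f]) listaNueva) []

-- ===== PRECONDITION & SPEC =====
-- Pre_ excludes exactly the inputs on which A raises IndexError: both lists nonempty and
-- either list contains an empty row, or some pListaB row of length 1 has a key matching a
-- pListaA key (A then reads its [1]).  When either list is empty A touches no row and
-- returns []; those inputs are inside Pre_ and B returns [] there too.
def Pre_acomadarNumerosImportantes (pListaA : List (List Int)) (pListaB : List (List Int)) : Prop :=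
  pListaA = [] ∨ pListaB = [] ∨
  ((∀ ra ∈ pListaA, ra ≠ []) ∧ (∀ rb ∈ pListaB, rb ≠ []) ∧
   (∀ ra ∈ pListaA, ∀ rb ∈ pListaB, pvKey ra = pvKey rb → 2 ≤ rb.length))
instance (pListaA : List (List Int)) (pListaB : List (List Int)) : Decidable (Pre_acomadarNumerosImportantes pListaA pListaB) := by unfold Pre_acomadarNumerosImportantes; infer_instance
def pvWitness_acomadarNumerosImportantes : List (List Int) × List (List Int) := ([[1, 5], [2]], [[1, 7], [3, 9], [1, 8]])
def Spec_acomadarNumerosImportantes (pListaA : List (List Int)) (pListaB : List (List Int)) (out : List Int) : Prop := out = acomadarNumerosImportantes_alt pListaA pListaB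
instance (pListaA : List (List Int)) (pListaB : List (List Int)) (out : List Int) : Decidable (Spec_acomadarNumerosImportantes pListaA pListaB out) := by unfold Spec_acomadarNumerosImportantes; infer_instance

-- ===== CLAIM (what is proved, stated in full; the proofs are below) =====
def Claim_equal_acomadarNumerosImportantes : Prop := ∀ (pListaA : List (List Int)) (pListaB : List (List Int)), Dom_acomadarNumerosImportantes pListaA pListaB → Pre_acomadarNumerosImportantes pListaA pListaB → Spec_acomadarNumerosImportantes pListaA pListaB (acomadarNumerosImportantes pListaA pListaB)

-- ===== LEMMAS AND PROOFS =====

-- the dict built by pvGroupB's loop holds, at each key, exactly the pListaB rows with that key, in order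
theorem pvGroup_getD (l : List (List Int)) (d : PySem.Dict Int (List (List Int))) (k : Int) :
    (l.foldl (fun d rb => d.insert (pvKey rb) (d.getD (pvKey rb) [] ++ [rb])) d).getD k []
      = d.getD k [] ++ l.filter (fun rb => pvKey rb = k) := by
  induction l generalizing d with
  | nil => simp
  | cons rb t ih =>
    simp only [List.foldl_cons, ih, List.filter_cons]
    by_cases h : pvKey rb = k
    · subst h
      rw [PySem.Dict.getD_insert_self]
      simp
    · rw [PySem.Dict.getD_insert_of_ne (hne := fun hk => h hk.symm)]
      simp [h]

theorem pvInnerA (l : List (List Int)) (acc : List Int) (k : Int) :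
    l.foldl (fun acc rb => if k = pvKey rb then acc ++ [pvVal rb] else acc) acc
      = acc ++ (l.filter (fun rb => pvKey rb = k)).map pvVal := by
  induction l generalizing acc with
  | nil => simp
  | cons rb t ih =>
    simp only [List.foldl_cons, List.filter_cons]
    by_cases h : pvKey rb = k
    · simp [h, ih]
    · rw [if_neg (fun hk => h hk.symm)]
      simp [h, ih]

theorem pvInnerB (g : List (List Int)) (acc : List Int) :
    g.foldl (fun acc f => acc ++ [pvVal f]) acc = acc ++ g.map pvVal := by
  induction g generalizing acc with
  | nil => simp
  | cons f t ih => simp [ih]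

theorem pvOuter (pListaA pListaB : List (List Int)) (acc : List Int) :
    pListaA.foldl (fun listaNueva ra =>
      pListaB.foldl (fun acc rb =>
        if pvKey ra = pvKey rb then acc ++ [pvVal rb] else acc) listaNueva) acc
    = pListaA.foldl (fun listaNueva ra =>
        ((pvGroupB pListaB).getD (pvKey ra) []).foldl (fun acc f => acc ++ [pvVal f]) listaNueva) acc := by
  induction pListaA generalizing acc with
  | nil => rfl
  | cons ra t ih =>
    simp only [List.foldl_cons, ih]
    congr 1
    rw [pvInnerA, pvInnerB, pvGroupB, pvGroup_getD]
    simp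

-- when either list is empty, A's nested loop leaves the accumulator untouched
theorem pvA_empty (pListaA pListaB : List (List Int))
    (h : pListaA = [] ∨ pListaB = []) :
    acomadarNumerosImportantes pListaA pListaB = [] := by
  rcases h with h | h
  · subst h; rfl
  · subst h
    unfold acomadarNumerosImportantes
    induction pListaA with
    | nil => rfl
    | cons ra t ih => simp_all

-- ===== VERDICT (by name: the statement is the Claim_ definition above) =====
theorem acomadarNumerosImportantes_spec : Claim_equal_acomadarNumerosImportantes := by
  intro pListaA pListaB _ _
  unfold Spec_acomadarNumerosImportantes acomadarNumerosImportantes_alt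
  by_cases h : pListaA = [] ∨ pListaB = []
  · rw [if_pos h, pvA_empty pListaA pListaB h]
  · rw [if_neg h]
    exact pvOuter pListaA pListaB []
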